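-- pv_equiv track=rewrite | github.com/felmartins1985/restaurant_orders | src/analyze_log.py | find_foods_set
-- ===== SOURCE A (Python) =====
-- def find_foods_set(data, name_person):
--     all_foods = set()
--     all_foods_person = set()
--     for name, food, _ in data:
--         all_foods.add(food)
--         if name == name_person:
--             all_foods_person.add(food)
--     return all_foods.difference(all_foods_person)
-- ===== SOURCE B (Python) =====
-- def find_foods_set(data, name_person):
--     index = {}
--     for name, food, _ in data:
--         index.setdefault(food, set()).add(name)
--     return {food for food, eaters in index.items() if name_person not in eaters}
-- ===== Notes on version B (the rewrite author's own statement) =====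
-- stated objective: alternative
-- what changed: Instead of two global sets (all foods, foods eaten by the person) combined by a set difference, B builds a dict mapping each food to the set of its eaters in one pass and derives the answer by a per-food membership test over the dict items.
import Mathlib
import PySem

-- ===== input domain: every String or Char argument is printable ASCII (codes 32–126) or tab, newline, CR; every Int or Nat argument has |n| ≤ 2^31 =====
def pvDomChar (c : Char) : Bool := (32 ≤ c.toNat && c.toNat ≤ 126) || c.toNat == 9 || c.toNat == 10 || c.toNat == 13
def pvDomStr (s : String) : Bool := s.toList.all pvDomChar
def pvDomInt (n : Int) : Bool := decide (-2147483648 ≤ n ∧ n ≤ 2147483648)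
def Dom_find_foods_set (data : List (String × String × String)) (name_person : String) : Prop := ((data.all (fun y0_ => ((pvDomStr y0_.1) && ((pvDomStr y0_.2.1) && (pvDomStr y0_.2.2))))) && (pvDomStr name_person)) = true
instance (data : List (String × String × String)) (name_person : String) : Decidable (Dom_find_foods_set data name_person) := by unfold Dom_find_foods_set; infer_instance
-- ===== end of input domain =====

-- B maintains a per-food eater index (dict food -> set of eaters) instead of A's two
-- global sets, and answers by a membership test per food; alternative decomposition,
-- same asymptotic cost. Equality proved on the whole domain (return value only).

-- ===== PORT A =====
def find_foods_set (data : List (String × String × String)) (name_person : String) : List String :=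
  let st := data.foldl
    (fun (st : PySem.Set String × PySem.Set String) t =>
      let all_foods := PySem.Set.add st.1 t.2.1
      let all_foods_person := if t.1 == name_person then PySem.Set.add st.2 t.2.1 else st.2
      (all_foods, all_foods_person))
    (PySem.Set.empty, PySem.Set.empty)
  PySem.Set.diff st.1 st.2

-- ===== PORT B =====
-- index.setdefault(food, set()).add(name) sets index[food] = index.get(food, set()) ∪ {name}
-- in place, which is exactly Dict.modify with default the empty set.
def find_foods_set_alt (data : List (String × String × String)) (name_person : String) : List String :=
  let index := data.foldl
    (fun (d : PySem.Dict String (PySem.Set String)) t =>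
      d.modify t.2.1 PySem.Set.empty (fun s => PySem.Set.add s t.1))
    PySem.Dict.empty
  PySem.Set.ofList
    ((index.items.filter (fun p => !(PySem.Set.contains p.2 name_person))).map Prod.fst)

-- ===== PRECONDITION & SPEC =====
def Spec_find_foods_set (data : List (String × String × String)) (name_person : String) (out : List String) : Prop := out = find_foods_set_alt data name_person
instance (data : List (String × String × String)) (name_person : String) (out : List String) : Decidable (Spec_find_foods_set data name_person out) := by unfold Spec_find_foods_set; infer_instance

-- ===== CLAIM (what is proved, stated in full; the proofs are below) =====
def Claim_equal_find_foods_set : Prop := ∀ (data : List (String × String × String)) (name_person : String), Dom_find_foods_set data name_person → Spec_find_foods_set data name_person (find_foods_set data name_person)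

-- ===== LEMMAS AND PROOFS =====

-- Loop invariant: after processing any prefix from related states, A's set of all foods
-- is B's key list, and a food is in A's person-set iff name_person is among its eaters in B.
theorem pv_loop_inv (name_person : String) :
    ∀ (data : List (String × String × String)) (st : PySem.Set String × PySem.Set String)
      (d : PySem.Dict String (PySem.Set String)),
      st.1 = d.keys →
      (∀ f, f ∈ st.2 ↔ name_person ∈ d.getD f PySem.Set.empty) →
      (data.foldl
        (fun (st : PySem.Set String × PySem.Set String) t =>
          let all_foods := PySem.Set.add st.1 t.2.1
          let all_foods_person := if t.1 == name_person then PySem.Set.add st.2 t.2.1 else st.2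
          (all_foods, all_foods_person)) st).1
        = (data.foldl
            (fun (d : PySem.Dict String (PySem.Set String)) t =>
              d.modify t.2.1 PySem.Set.empty (fun s => PySem.Set.add s t.1)) d).keys
      ∧ ∀ f, f ∈ (data.foldl
          (fun (st : PySem.Set String × PySem.Set String) t =>
            let all_foods := PySem.Set.add st.1 t.2.1
            let all_foods_person := if t.1 == name_person then PySem.Set.add st.2 t.2.1 else st.2
            (all_foods, all_foods_person)) st).2
          ↔ name_person ∈ ((data.foldl
              (fun (d : PySem.Dict String (PySem.Set String)) t =>
                d.modify t.2.1 PySem.Set.empty (fun s => PySem.Set.add s t.1)) d).getD f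
              PySem.Set.empty) := by
  intro data
  induction data with
  | nil => intro st d h1 h2; exact ⟨h1, h2⟩
  | cons hd tl ih =>
    intro st d h1 h2
    obtain ⟨name, food, rest⟩ := hd
    simp only [List.foldl_cons]
    apply ih
    · -- keys invariant for one step
      simp only [PySem.Dict.keys_modify]
      by_cases hc : d.contains food
      · rw [PySem.Dict.keys_insert_of_contains d _ hc,
            PySem.Set.add_of_mem (by rw [h1, ← PySem.Dict.contains_iff_mem_keys]; exact hc)]
        exact h1
      · rw [PySem.Dict.keys_insert_of_not_contains d _ (by simpa using hc),
            PySem.Set.add_of_not_mem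
              (by rw [h1, ← PySem.Dict.contains_iff_mem_keys]; simpa using hc), h1]
    · -- person-set / eater-set invariant for one step
      intro f
      rw [show (d.modify food PySem.Set.empty (fun s => PySem.Set.add s name)).getD f PySem.Set.empty
            = if f = food then PySem.Set.add (d.getD food PySem.Set.empty) name
              else d.getD f PySem.Set.empty from PySem.Dict.getD_modify d food f _ _]
      by_cases hn : name = name_person
      · have hb : (name == name_person) = true := by simp [hn]
        rw [if_pos hb]
        by_cases hf : f = food
        · subst hf; subst hn
          simp [PySem.Set.mem_add]
        · rw [if_neg hf, PySem.Set.mem_add]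
          constructor
          · rintro (h | h)
            · exact (h2 f).mp h
            · exact absurd h hf
          · intro h; exact Or.inl ((h2 f).mpr h)
      · have hb : (name == name_person) = false := by simp [hn]
        rw [if_neg (by simp [hb])]
        by_cases hf : f = food
        · subst hf
          rw [if_pos rfl, PySem.Set.mem_add]
          constructor
          · intro h; exact Or.inl ((h2 f).mp h)
          · rintro (h | h)
            · exact (h2 f).mpr h
            · exact absurd h.symm hn
        · rw [if_neg hf]; exact h2 f

-- Final step: relate A's set difference to B's filtered items, for any final states
-- satisfying the invariant.
theorem pv_final (name_person : String) (stF : PySem.Set String × PySem.Set String)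
    (dF : PySem.Dict String (PySem.Set String))
    (hkeys : stF.1 = dF.keys)
    (hmem : ∀ f, f ∈ stF.2 ↔ name_person ∈ dF.getD f PySem.Set.empty)
    (hnd : dF.keys.Nodup) :
    PySem.Set.diff stF.1 stF.2
      = PySem.Set.ofList
          ((dF.items.filter (fun p => !(PySem.Set.contains p.2 name_person))).map Prod.fst) := by
  simp only [PySem.Set.empty] at hmem
  rw [PySem.Dict.items_eq_map_keys dF hnd [], List.filter_map, List.map_map]
  have hmapfst : ((dF.keys.filter
      ((fun p : String × PySem.Set String => !(PySem.Set.contains p.2 name_person)) ∘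
        fun k => (k, dF.getD k []))).map
      (Prod.fst ∘ fun k => (k, dF.getD k [])))
      = dF.keys.filter (fun k => !(PySem.Set.contains (dF.getD k []) name_person)) := by
    simp [Function.comp_def]
  rw [hmapfst, PySem.Set.ofList_eq_self_of_nodup _ (hnd.filter _), hkeys]
  unfold PySem.Set.diff
  apply List.filter_congr
  intro k _
  have hk := hmem k
  simp only [PySem.Set.contains] at *
  by_cases h : name_person ∈ dF.getD k []
  · simp [h, hk.mpr h]
  · simp [h]
    exact fun hkk => h (hk.mp hkk)

theorem find_foods_set_eq (data : List (String × String × String)) (name_person : String) :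
    find_foods_set data name_person = find_foods_set_alt data name_person := by
  have hinv := pv_loop_inv name_person data (PySem.Set.empty, PySem.Set.empty) PySem.Dict.empty
    (by simp [PySem.Set.empty, PySem.Dict.keys_empty])
    (by intro f; simp [PySem.Set.empty, PySem.Dict.getD_empty])
  have hnd : (data.foldl
      (fun (d : PySem.Dict String (PySem.Set String)) t =>
        d.modify t.2.1 PySem.Set.empty (fun s => PySem.Set.add s t.1)) PySem.Dict.empty).keys.Nodup :=
    PySem.Dict.nodup_keys_foldl_modify_key data (fun t => t.2.1) PySem.Set.empty
      (fun d t s => PySem.Set.add s t.1) PySem.Dict.empty (by simp [PySem.Dict.keys_empty])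
  exact pv_final name_person _ _ hinv.1 hinv.2 hnd

-- ===== VERDICT (by name: the statement is the Claim_ definition above) =====
theorem find_foods_set_spec : Claim_equal_find_foods_set := by
  intro data name_person _
  unfold Spec_find_foods_set
  exact find_foods_set_eq data name_person
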